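-- pv_equiv track=rewrite | github.com/Languisher/CSC_4OS02_TA-Systemes-Paralleles-et-Distribues | tp2/mandelbrot.py | static_balanced_rows
-- ===== SOURCE A (Python) =====
-- def static_balanced_rows(height: int) -> list[int]:
--     rows = []
--     for i in range((height + 1) // 2):
--         rows.append(i)
--         j = height - 1 - i
--         if j != i:
--             rows.append(j)
--     return rows
-- ===== SOURCE B (Python) =====
-- def static_balanced_rows(height: int) -> list[int]:
--     idx = list(range(height))
--     woven = [x for pair in zip(idx, reversed(idx)) for x in pair]
--     return woven[:height]
-- ===== Notes on version B (the rewrite author's own statement) =====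
-- stated objective: alternative
-- what changed: A walks only the first half of the rows, computing each mirror index j = height-1-i inline with an equality guard; B never halves: it weaves the full index list with its reverse (zip + flatten) into a double-length list and truncates it to height elements, which yields the same outside-in order with no parity case.
import Mathlib
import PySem

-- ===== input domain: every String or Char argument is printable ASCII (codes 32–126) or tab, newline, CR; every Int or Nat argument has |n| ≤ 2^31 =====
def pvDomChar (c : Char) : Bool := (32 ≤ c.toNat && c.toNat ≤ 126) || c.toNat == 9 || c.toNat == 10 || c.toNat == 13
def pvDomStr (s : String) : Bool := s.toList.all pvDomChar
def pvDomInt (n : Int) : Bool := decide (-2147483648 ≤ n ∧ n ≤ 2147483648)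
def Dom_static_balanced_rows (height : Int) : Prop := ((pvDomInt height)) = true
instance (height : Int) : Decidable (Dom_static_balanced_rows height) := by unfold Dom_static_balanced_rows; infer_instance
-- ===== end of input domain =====

-- B weaves the full index list with its reverse and truncates to height elements,
-- replacing A's half-range loop with its inline mirror index and equality guard
-- (objective: alternative; same cost).

-- ===== PORT A =====
def static_balanced_rows (height : Int) : List Int :=
  (PySem.List.pyRange 0 (PySem.Int.floordiv (height + 1) 2) 1).foldl
    (fun rows i =>
      let rows := rows ++ [i]
      let j := height - 1 - i
      if j ≠ i then rows ++ [j] else rows) []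

-- ===== PORT B =====
def static_balanced_rows_alt (height : Int) : List Int :=
  let idx := PySem.List.pyRange 0 height 1
  let woven := (idx.zip idx.reverse).flatMap (fun p => [p.1, p.2])
  PySem.List.slice woven none (some height)

-- ===== PRECONDITION & SPEC =====
def Spec_static_balanced_rows (height : Int) (out : List Int) : Prop := out = static_balanced_rows_alt height
instance (height : Int) (out : List Int) : Decidable (Spec_static_balanced_rows height out) := by unfold Spec_static_balanced_rows; infer_instance

-- ===== CLAIM (what is proved, stated in full; the proofs are below) =====
def Claim_equal_static_balanced_rows : Prop := ∀ (height : Int), Dom_static_balanced_rows height → Spec_static_balanced_rows height (static_balanced_rows height)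

-- ===== LEMMAS AND PROOFS =====

-- A's loop as a flatMap over its range.
lemma A_flat (h : Int) : static_balanced_rows h =
    (PySem.List.pyRange 0 (PySem.Int.floordiv (h + 1) 2) 1).flatMap
      (fun i => if h - 1 - i ≠ i then [i, h - 1 - i] else [i]) := by
  unfold static_balanced_rows
  have hfun : (fun (rows : List Int) (i : Int) =>
      let rows := rows ++ [i]
      let j := h - 1 - i
      if j ≠ i then rows ++ [j] else rows)
      = fun rows i => rows ++ (if h - 1 - i ≠ i then [i, h - 1 - i] else [i]) := by
    funext rows i
    by_cases hc : h - 1 - i ≠ i <;> simp [hc]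
  rw [hfun, PySem.List.foldl_append_eq_flatMap]
  simp

-- B's woven list is a flatMap of mirror pairs over List.range.
lemma B_woven (h : Int) (hpos : 0 < h) :
    static_balanced_rows_alt h =
      (((List.range h.toNat).flatMap
        (fun k : Nat => [(0 : Int) + k, h - 1 - (k : Int)])).take h.toNat) := by
  have hrev : (PySem.List.pyRange 0 h 1).reverse = PySem.List.pyRange (h - 1) (-1) (-1) := by
    rw [PySem.List.pyRange_neg_one_eq_reverse]
    norm_num
  have h1 : (h - 0).toNat = h.toNat := by omega
  have h2 : (h - 1 - (-1)).toNat = h.toNat := by omega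
  simp only [static_balanced_rows_alt]
  rw [hrev, PySem.List.pyRange_neg_one, PySem.List.pyRange_one, h1, h2, List.zip_map',
    List.flatMap_map, PySem.List.slice_to _ hpos.le]

-- take of a flatMap of length-2 blocks, cut one short of the end: drops the
-- second half of the last block.
lemma take_woven (h : Int) (N : Nat) :
    List.take ((N + 1) + N) ((List.range ((N + 1) + N)).flatMap
        (fun k : Nat => [(0 : Int) + k, h - 1 - (k : Int)]))
      = (List.range N).flatMap (fun k : Nat => [(0 : Int) + k, h - 1 - (k : Int)])
        ++ [(0 : Int) + (N : Int)] := by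
  rw [List.range_add, List.flatMap_append, List.take_append]
  have hlen1 : ((List.range (N + 1)).flatMap
      (fun k : Nat => [(0 : Int) + k, h - 1 - (k : Int)])).length = 2 * (N + 1) := by
    rw [List.length_flatMap]
    simp [List.map_const']
    omega
  have hz : (N + 1) + N - ((List.range (N + 1)).flatMap
      (fun k : Nat => [(0 : Int) + k, h - 1 - (k : Int)])).length = 0 := by
    rw [hlen1]; omega
  rw [hz, List.take_zero, List.append_nil, List.range_succ, List.flatMap_append,
    List.take_append]
  have hlen2 : ((List.range N).flatMap
      (fun k : Nat => [(0 : Int) + k, h - 1 - (k : Int)])).length = 2 * N := by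
    rw [List.length_flatMap]
    simp [List.map_const']
    omega
  have htk : ((List.range N).flatMap
      (fun k : Nat => [(0 : Int) + k, h - 1 - (k : Int)])).length ≤ (N + 1) + N := by
    rw [hlen2]; omega
  have ht1 : (N + 1) + N - ((List.range N).flatMap
      (fun k : Nat => [(0 : Int) + k, h - 1 - (k : Int)])).length = 1 := by
    rw [hlen2]; omega
  rw [List.take_of_length_le htk, ht1]
  simp

lemma main_eq (h : Int) : static_balanced_rows h = static_balanced_rows_alt h := by
  have hm : PySem.Int.floordiv (h + 1) 2 = (h + 1) / 2 :=
    PySem.Int.floordiv_eq_ediv_of_pos (by norm_num)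
  rcases (show h ≤ 0 ∨ 0 < h by omega) with hle | hpos
  · -- height ≤ 0 : both empty
    have hm0 : (h + 1) / 2 ≤ 0 := by omega
    unfold static_balanced_rows static_balanced_rows_alt
    rw [hm, PySem.List.pyRange_one_eq_nil hm0, PySem.List.pyRange_one_eq_nil hle]
    simp [PySem.List.slice]
  · rw [A_flat, B_woven h hpos, hm, PySem.List.pyRange_one, List.flatMap_map]
    rcases Int.even_or_odd h with ⟨c, hc⟩ | ⟨c, hc⟩
    · -- even height h = 2c, c ≥ 1: the take keeps exactly the first c blocks
      have hc1 : 1 ≤ c := by omega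
      have hmc : ((h + 1) / 2 - 0).toNat = c.toNat := by omega
      have hn : h.toNat = c.toNat + c.toNat := by omega
      rw [hmc, hn, List.range_add, List.flatMap_append, List.take_append]
      have hlen : ((List.range c.toNat).flatMap
          (fun k : Nat => [(0 : Int) + k, h - 1 - (k : Int)])).length = c.toNat + c.toNat := by
        rw [List.length_flatMap]
        simp [List.map_const']
        omega
      have hz : c.toNat + c.toNat - ((List.range c.toNat).flatMap
          (fun k : Nat => [(0 : Int) + k, h - 1 - (k : Int)])).length = 0 := by
        rw [hlen]; omega
      rw [hz, List.take_zero, List.append_nil, List.take_of_length_le hlen.le]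
      refine List.flatMap_congr (fun k hk => ?_)
      have hklt : k < c.toNat := List.mem_range.mp hk
      have hne : ¬ (h - 1 - (k : Int) = (k : Int)) := by omega
      simp [hne]
    · -- odd height h = 2c + 1, c ≥ 0: the take cuts the middle block in half
      have hc0 : 0 ≤ c := by omega
      have hmc : ((h + 1) / 2 - 0).toNat = c.toNat + 1 := by omega
      have hn : h.toNat = (c.toNat + 1) + c.toNat := by omega
      rw [hmc, hn, take_woven h c.toNat, List.range_succ, List.flatMap_append]
      congr 1
      · refine List.flatMap_congr (fun k hk => ?_)
        have hklt : k < c.toNat := List.mem_range.mp hk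
        have hne : ¬ (h - 1 - (k : Int) = (k : Int)) := by omega
        simp [hne]
      · simp
        omega

-- ===== VERDICT (by name: the statement is the Claim_ definition above) =====
theorem static_balanced_rows_spec : Claim_equal_static_balanced_rows := by
  intro h _
  unfold Spec_static_balanced_rows
  exact main_eq h
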